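-- pv_equiv track=rewrite | github.com/GeDiNe-Lab/MitoMatcherAnalysis | Pipeline_JSON_to_formattedTable/pipeline/generate_absence_presence_HPO.py | generate_absence_presence_HPO
-- ===== SOURCE A (Python) =====
-- def generate_absence_presence_HPO(global_hpo):
--     """
--     This function generates a table of presence/absence of HPO terms for each patient.
--
--     :param global_hpo: Dictionary containing patient HPO data, structured as
--                         {"patient_id": [(hpo_terms, hpo_name), ...]}.
--
--     :return: A tuple consisting of:
--         - unique_symptome_list: List of all unique HPO names found across all patients.
--         - presence_absence_complete: Dictionary containing the presence (1) or absence (0) of each symptom for each patient.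
--     """
--
--     unique_symptome_list = [] # List to store unique HPO names across all patients
--     patient_data = {} # Dictionary to store the HPO names for each patient
--
--     # Structure: {"patient_id" : [(hpo_terms, hpo_name), ]}
--
--     presence_absence_complete = {} # Dictionary to store presence (1) or absence (0) of HPO terms for each patient
--
--     # Loop through all the patients and their associated HPO data
--     for patient, hpos in global_hpo.items():
--
--         hpo_names_for_one_patient = [] # List to store HPO names for the current patient
--
--         # Loop through all the HPO combinations for the patient
--         for hpo_combination in hpos:
--
--             hpo_name = hpo_combination[1] # Extract the HPO name
--
--             # Add the HPO name to the patient's list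
--             hpo_names_for_one_patient.append(hpo_name)
--
--             # Add the HPO name to the list of unique symptoms if it's not already there and not an empty string
--             if hpo_name not in unique_symptome_list and hpo_name != "":
--                 unique_symptome_list.append(hpo_name)
--
--         # Store the list of HPO names for the current patient
--         patient_data[patient] = hpo_names_for_one_patient
--
--     # 2. Create a dictionary of presence (1) or absence (0) of each HPO term for each patient
--     for patient, values in patient_data.items():
--
--         # Initialize an empty list for each patient's presence/absence data
--         presence_absence_complete[patient] = []
--
--         # For each unique HPO name, check if it is present in the patient's data
--         for symptome in unique_symptome_list:
--             # Append 1 if the symptom is present, 0 if it is absent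
--             presence_absence_complete[patient].append([0 if symptome not in values else 1][0])
--
--     return unique_symptome_list, presence_absence_complete
-- ===== SOURCE B (Python) =====
-- def generate_absence_presence_HPO(global_hpo):
--     # One pass builds the ordered unique name list together with a name->column index;
--     # a second pass scatters 1s into zero rows via that index (no per-cell membership scan).
--     unique_symptome_list = []
--     index = {}
--     for hpos in global_hpo.values():
--         for hpo_combination in hpos:
--             name = hpo_combination[1]
--             if name != "" and name not in index:
--                 index[name] = len(unique_symptome_list)
--                 unique_symptome_list.append(name)
--     presence_absence_complete = {}
--     for patient, hpos in global_hpo.items():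
--         row = [0] * len(unique_symptome_list)
--         for hpo_combination in hpos:
--             i = index.get(hpo_combination[1])
--             if i is not None:
--                 row[i] = 1
--         presence_absence_complete[patient] = row
--     return unique_symptome_list, presence_absence_complete
-- ===== Notes on version B (the rewrite author's own statement) =====
-- stated objective: faster
-- what changed: B builds a name-to-column index dict in the first pass and fills each patient's row by scattering 1s at indexed positions into a zero row, instead of A's per-cell membership scan of the patient's symptom list for every unique symptom.
import Mathlib
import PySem

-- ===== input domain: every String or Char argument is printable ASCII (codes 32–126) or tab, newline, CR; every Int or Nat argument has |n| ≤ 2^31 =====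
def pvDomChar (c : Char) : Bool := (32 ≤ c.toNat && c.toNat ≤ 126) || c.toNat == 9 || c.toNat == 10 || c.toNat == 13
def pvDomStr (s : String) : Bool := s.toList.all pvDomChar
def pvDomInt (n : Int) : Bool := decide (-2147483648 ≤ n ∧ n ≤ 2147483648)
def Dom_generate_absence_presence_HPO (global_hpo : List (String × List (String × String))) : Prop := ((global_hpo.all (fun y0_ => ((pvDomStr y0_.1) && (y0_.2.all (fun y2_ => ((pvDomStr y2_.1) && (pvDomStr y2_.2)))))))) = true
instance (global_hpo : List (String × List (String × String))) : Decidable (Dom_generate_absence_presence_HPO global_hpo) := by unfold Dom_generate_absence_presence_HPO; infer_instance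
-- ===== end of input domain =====

-- B replaces A's per-cell membership scan over every unique symptom by a single name→column
-- index built in the first pass and a scatter of 1s into zero rows (objective: faster).
-- Both dict results are ported as association lists in insertion order.

-- ===== PORT A =====
-- first loop: state (unique_symptome_list, patient_data); inner loop over one patient's hpos
def gapA_pass1 (global_hpo : List (String × List (String × String))) :
    List String × List (String × List String) :=
  global_hpo.foldl
    (fun st pat =>
      let inner := pat.2.foldl
        (fun (st2 : List String × List String) hpo_combination =>
          let names := st2.2 ++ [hpo_combination.2]
          let unique :=
            if hpo_combination.2 ∉ st2.1 ∧ hpo_combination.2 ≠ "" then st2.1 ++ [hpo_combination.2]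
            else st2.1
          (unique, names))
        (st.1, [])
      (inner.1, st.2 ++ [(pat.1, inner.2)]))
    ([], [])

def generate_absence_presence_HPO (global_hpo : List (String × List (String × String))) :
    List String × (List (String × List Int)) :=
  let p := gapA_pass1 global_hpo
  let unique_symptome_list := p.1
  let patient_data := p.2
  let presence_absence_complete := patient_data.foldl
    (fun acc pv =>
      acc ++ [(pv.1,
        unique_symptome_list.foldl
          (fun row symptome => row ++ [if symptome ∉ pv.2 then (0 : Int) else 1]) [])])
    []
  (unique_symptome_list, presence_absence_complete)

-- ===== PORT B =====
-- first pass: ordered unique list together with the name -> column index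
def gapB_pass1 (global_hpo : List (String × List (String × String))) :
    List String × PySem.Dict String Nat :=
  global_hpo.foldl
    (fun st pat =>
      pat.2.foldl
        (fun (st2 : List String × PySem.Dict String Nat) hpo_combination =>
          let name := hpo_combination.2
          if name ≠ "" ∧ (st2.2.get? name) = none then
            (st2.1 ++ [name], st2.2.insert name st2.1.length)
          else st2)
        st)
    ([], PySem.Dict.empty)

-- second pass: a zero row per patient, 1s scattered through the index
def gapB_row (index : PySem.Dict String Nat) (n : Nat) (hpos : List (String × String)) : List Int :=
  hpos.foldl
    (fun row hpo_combination =>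
      match index.get? hpo_combination.2 with
      | some i => row.set i 1
      | none => row)
    (List.replicate n 0)

def generate_absence_presence_HPO_alt (global_hpo : List (String × List (String × String))) :
    List String × (List (String × List Int)) :=
  let p := gapB_pass1 global_hpo
  let unique_symptome_list := p.1
  let index := p.2
  let presence_absence_complete := global_hpo.foldl
    (fun acc pat => acc ++ [(pat.1, gapB_row index unique_symptome_list.length pat.2)]) []
  (unique_symptome_list, presence_absence_complete)

-- ===== PRECONDITION & SPEC =====
def Spec_generate_absence_presence_HPO (global_hpo : List (String × List (String × String))) (out : List String × (List (String × List Int))) : Prop := out = generate_absence_presence_HPO_alt global_hpo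
instance (global_hpo : List (String × List (String × String))) (out : List String × (List (String × List Int))) : Decidable (Spec_generate_absence_presence_HPO global_hpo out) := by unfold Spec_generate_absence_presence_HPO; infer_instance

-- ===== CLAIM (what is proved, stated in full; the proofs are below) =====
def Claim_equal_generate_absence_presence_HPO : Prop := ∀ (global_hpo : List (String × List (String × String))), Dom_generate_absence_presence_HPO global_hpo → Spec_generate_absence_presence_HPO global_hpo (generate_absence_presence_HPO global_hpo)

-- ===== LEMMAS AND PROOFS =====

-- the index dict is exactly the positional index of the unique list
def gapInv (u : List String) (d : PySem.Dict String Nat) : Prop :=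
  u.Nodup ∧ (∀ s : String, d.get? s = none ↔ s ∉ u) ∧
    (∀ (s : String) (i : Nat), d.get? s = some i → u[i]? = some s)

theorem gapInv_empty : gapInv [] PySem.Dict.empty := by
  refine ⟨List.nodup_nil, fun s => ?_, fun s i h => ?_⟩
  · simp [PySem.Dict.get?_empty]
  · simp [PySem.Dict.get?_empty] at h

theorem gapInv_step (u : List String) (d : PySem.Dict String Nat) (name : String)
    (h : gapInv u d) (hn : name ∉ u) :
    gapInv (u ++ [name]) (d.insert name u.length) := by
  obtain ⟨hnd, hnone, hsome⟩ := h
  refine ⟨?_, fun s => ?_, fun s i hi => ?_⟩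
  · simp only [List.nodup_append, hnd, List.nodup_singleton, true_and]
    intro a ha b hb
    rw [List.mem_singleton] at hb
    subst hb
    exact fun hab => hn (hab ▸ ha)
  · rw [PySem.Dict.get?_insert]
    by_cases hs : s = name
    · subst hs
      simp
    · rw [if_neg hs, hnone]
      simp [hs]
  · rw [PySem.Dict.get?_insert] at hi
    by_cases hs : s = name
    · subst hs
      rw [if_pos rfl, Option.some_inj] at hi
      subst hi
      simp
    · rw [if_neg hs] at hi
      have hu := hsome s i hi
      have hlt : i < u.length := by
        by_contra hge
        rw [List.getElem?_eq_none (by omega : u.length ≤ i)] at hu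
        cases hu
      rw [List.getElem?_append_left hlt]
      exact hu

theorem foldl_append_eq_map {α β : Type} (xs : List α) (init : List β) (f : α → β) :
    xs.foldl (fun acc x => acc ++ [f x]) init = init ++ xs.map f := by
  induction xs generalizing init with
  | nil => simp
  | cons x xs ih => simp [List.foldl_cons, ih]

-- the two first passes agree on the unique list, preserving the invariant; A's names list is the map
theorem gap_pass1_inner (vs : List (String × String)) (u : List String) (d : PySem.Dict String Nat)
    (names0 : List String) (h : gapInv u d) :
    (vs.foldl (fun (st2 : List String × List String) hpo_combination =>
          let names := st2.2 ++ [hpo_combination.2]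
          let unique :=
            if hpo_combination.2 ∉ st2.1 ∧ hpo_combination.2 ≠ "" then st2.1 ++ [hpo_combination.2]
            else st2.1
          (unique, names))
      (u, names0)).1
      = (vs.foldl (fun (st2 : List String × PySem.Dict String Nat) hpo_combination =>
          let name := hpo_combination.2
          if name ≠ "" ∧ (st2.2.get? name) = none then
            (st2.1 ++ [name], st2.2.insert name st2.1.length)
          else st2) (u, d)).1
    ∧ (vs.foldl (fun (st2 : List String × List String) hpo_combination =>
          let names := st2.2 ++ [hpo_combination.2]
          let unique :=
            if hpo_combination.2 ∉ st2.1 ∧ hpo_combination.2 ≠ "" then st2.1 ++ [hpo_combination.2]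
            else st2.1
          (unique, names))
      (u, names0)).2 = names0 ++ vs.map (·.2)
    ∧ gapInv (vs.foldl (fun (st2 : List String × PySem.Dict String Nat) hpo_combination =>
          let name := hpo_combination.2
          if name ≠ "" ∧ (st2.2.get? name) = none then
            (st2.1 ++ [name], st2.2.insert name st2.1.length)
          else st2) (u, d)).1
        (vs.foldl (fun (st2 : List String × PySem.Dict String Nat) hpo_combination =>
          let name := hpo_combination.2
          if name ≠ "" ∧ (st2.2.get? name) = none then
            (st2.1 ++ [name], st2.2.insert name st2.1.length)
          else st2) (u, d)).2 := by
  induction vs generalizing u d names0 with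
  | nil => exact ⟨rfl, by simp, h⟩
  | cons hc vs ih =>
    simp only [List.foldl_cons]
    by_cases hcond : hc.2 ∉ u ∧ hc.2 ≠ ""
    · have hb : hc.2 ≠ "" ∧ d.get? hc.2 = none := ⟨hcond.2, (h.2.1 hc.2).mpr hcond.1⟩
      rw [if_pos hcond, if_pos hb]
      have hres := ih (u ++ [hc.2]) (d.insert hc.2 u.length) (names0 ++ [hc.2])
        (gapInv_step u d hc.2 h hcond.1)
      refine ⟨hres.1, ?_, hres.2.2⟩
      rw [hres.2.1]
      simp
    · have hb : ¬(hc.2 ≠ "" ∧ d.get? hc.2 = none) := by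
        intro hx
        exact hcond ⟨(h.2.1 hc.2).mp hx.2, hx.1⟩
      rw [if_neg hcond, if_neg hb]
      have hres := ih u d (names0 ++ [hc.2]) h
      refine ⟨hres.1, ?_, hres.2.2⟩
      rw [hres.2.1]
      simp

theorem gap_pass1_outer (g : List (String × List (String × String))) (u : List String)
    (d : PySem.Dict String Nat) (pd : List (String × List String)) (h : gapInv u d) :
    (g.foldl (fun st pat =>
      let inner := pat.2.foldl
        (fun (st2 : List String × List String) hpo_combination =>
          let names := st2.2 ++ [hpo_combination.2]
          let unique :=
            if hpo_combination.2 ∉ st2.1 ∧ hpo_combination.2 ≠ "" then st2.1 ++ [hpo_combination.2]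
            else st2.1
          (unique, names))
        (st.1, [])
      (inner.1, st.2 ++ [(pat.1, inner.2)])) (u, pd)).1
      = (g.foldl (fun st pat =>
          pat.2.foldl
            (fun (st2 : List String × PySem.Dict String Nat) hpo_combination =>
              let name := hpo_combination.2
              if name ≠ "" ∧ (st2.2.get? name) = none then
                (st2.1 ++ [name], st2.2.insert name st2.1.length)
              else st2)
            st) (u, d)).1
    ∧ (g.foldl (fun st pat =>
      let inner := pat.2.foldl
        (fun (st2 : List String × List String) hpo_combination =>
          let names := st2.2 ++ [hpo_combination.2]
          let unique :=
            if hpo_combination.2 ∉ st2.1 ∧ hpo_combination.2 ≠ "" then st2.1 ++ [hpo_combination.2]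
            else st2.1
          (unique, names))
        (st.1, [])
      (inner.1, st.2 ++ [(pat.1, inner.2)])) (u, pd)).2
      = pd ++ g.map (fun pat => (pat.1, pat.2.map (·.2)))
    ∧ gapInv (g.foldl (fun st pat =>
          pat.2.foldl
            (fun (st2 : List String × PySem.Dict String Nat) hpo_combination =>
              let name := hpo_combination.2
              if name ≠ "" ∧ (st2.2.get? name) = none then
                (st2.1 ++ [name], st2.2.insert name st2.1.length)
              else st2)
            st) (u, d)).1
        (g.foldl (fun st pat =>
          pat.2.foldl
            (fun (st2 : List String × PySem.Dict String Nat) hpo_combination =>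
              let name := hpo_combination.2
              if name ≠ "" ∧ (st2.2.get? name) = none then
                (st2.1 ++ [name], st2.2.insert name st2.1.length)
              else st2)
            st) (u, d)).2 := by
  induction g generalizing u d pd with
  | nil => exact ⟨rfl, by simp, h⟩
  | cons pat g ih =>
    simp only [List.foldl_cons]
    have hin := gap_pass1_inner pat.2 u d [] h
    rw [hin.1]
    have hres := ih _ _ (pd ++ [(pat.1, (pat.2.foldl (fun (st2 : List String × List String) hpo_combination =>
          let names := st2.2 ++ [hpo_combination.2]
          let unique :=
            if hpo_combination.2 ∉ st2.1 ∧ hpo_combination.2 ≠ "" then st2.1 ++ [hpo_combination.2]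
            else st2.1
          (unique, names)) (u, [])).2)]) hin.2.2
    refine ⟨hres.1, ?_, hres.2.2⟩
    rw [hres.2.1, hin.2.1]
    simp

theorem gap_pass1_eq (global_hpo : List (String × List (String × String))) :
    (gapA_pass1 global_hpo).1 = (gapB_pass1 global_hpo).1
    ∧ (gapA_pass1 global_hpo).2 = global_hpo.map (fun pat => (pat.1, pat.2.map (·.2)))
    ∧ gapInv (gapB_pass1 global_hpo).1 (gapB_pass1 global_hpo).2 := by
  have := gap_pass1_outer global_hpo [] PySem.Dict.empty [] gapInv_empty
  exact ⟨this.1, by rw [show (gapA_pass1 global_hpo).2 = _ from this.2.1]; simp, this.2.2⟩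

theorem gapB_row_fold_get (u : List String) (d : PySem.Dict String Nat) (h : gapInv u d)
    (vs : List (String × String)) (r : List Int) (hr : r.length = u.length) (i : Nat) :
    (vs.foldl (fun row hpo_combination =>
      match d.get? hpo_combination.2 with
      | some i => row.set i 1
      | none => row) r)[i]? = if ∃ p ∈ vs, u[i]? = some p.2 then some 1 else r[i]? := by
  induction vs generalizing r with
  | nil => simp
  | cons p vs ih =>
    simp only [List.foldl_cons]
    cases hd : d.get? p.2 with
    | none =>
      rw [show (List.foldl (fun row hpo_combination =>
          match d.get? hpo_combination.2 with
          | some i => row.set i 1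
          | none => row) (match (none : Option Nat) with | some i => r.set i 1 | none => r) vs)
        = (List.foldl (fun row hpo_combination =>
          match d.get? hpo_combination.2 with
          | some i => row.set i 1
          | none => row) r vs) from rfl]
      rw [ih r hr]
      have hnm : p.2 ∉ u := (h.2.1 p.2).mp hd
      have hcnd : (∃ q ∈ p :: vs, u[i]? = some q.2) ↔ (∃ q ∈ vs, u[i]? = some q.2) := by
        constructor
        · rintro ⟨q, hq, hque⟩
          rcases List.mem_cons.mp hq with hq | hq
          · subst hq
            exact absurd (List.mem_of_getElem? hque) hnm
          · exact ⟨q, hq, hque⟩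
        · rintro ⟨q, hq, hque⟩
          exact ⟨q, List.mem_cons_of_mem _ hq, hque⟩
      rw [if_congr hcnd rfl rfl]
    | some j =>
      have hu : u[j]? = some p.2 := h.2.2 p.2 j hd
      have hj : j < u.length := by
        by_contra hge
        rw [List.getElem?_eq_none (by omega : u.length ≤ j)] at hu
        cases hu
      rw [show (List.foldl (fun row hpo_combination =>
          match d.get? hpo_combination.2 with
          | some i => row.set i 1
          | none => row) (match (some j : Option Nat) with | some i => r.set i 1 | none => r) vs)
        = (List.foldl (fun row hpo_combination =>
          match d.get? hpo_combination.2 with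
          | some i => row.set i 1
          | none => row) (r.set j 1) vs) from rfl]
      rw [ih (r.set j 1) (by simp [hr])]
      by_cases hij : i = j
      · subst hij
        have h1 : u[i]? = some p.2 := hu
        rw [if_pos (⟨p, List.mem_cons_self, h1⟩ : ∃ q ∈ p :: vs, u[i]? = some q.2)]
        rw [List.getElem?_set_self (by omega : i < r.length)]
        split <;> rfl
      · have hne : u[i]? ≠ some p.2 := by
          intro hie
          have : i < u.length := by
            by_contra hge
            rw [List.getElem?_eq_none (by omega : u.length ≤ i)] at hie
            cases hie
          exact hij (List.getElem?_inj this h.1 (hie.trans hu.symm))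
        have hcnd : (∃ q ∈ p :: vs, u[i]? = some q.2) ↔ (∃ q ∈ vs, u[i]? = some q.2) := by
          constructor
          · rintro ⟨q, hq, hque⟩
            rcases List.mem_cons.mp hq with hq | hq
            · exact absurd (hq ▸ hque) hne
            · exact ⟨q, hq, hque⟩
          · rintro ⟨q, hq, hque⟩
            exact ⟨q, List.mem_cons_of_mem _ hq, hque⟩
        rw [if_congr hcnd rfl rfl, List.getElem?_set_ne (by omega)]

theorem gapB_row_eq (u : List String) (d : PySem.Dict String Nat) (h : gapInv u d)
    (vs : List (String × String)) :
    gapB_row d u.length vs = u.map (fun s => if s ∉ vs.map (·.2) then (0 : Int) else 1) := by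
  apply List.ext_getElem?
  intro i
  unfold gapB_row
  rw [gapB_row_fold_get u d h vs _ (by simp) i, List.getElem?_map]
  by_cases hi : i < u.length
  · rw [List.getElem?_eq_getElem hi]
    simp only [Option.map_some]
    by_cases hm : u[i] ∈ vs.map (·.2)
    · obtain ⟨q, hq, hque⟩ := List.mem_map.mp hm
      rw [if_pos (⟨q, hq, by rw [hque]⟩ : ∃ p ∈ vs, (some u[i] : Option String) = some p.2),
        if_neg (by simpa using hm)]
    · have hnex : ¬ ∃ q ∈ vs, (some u[i] : Option String) = some q.2 := by
        rintro ⟨q, hq, hque⟩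
        rw [Option.some_inj] at hque
        exact hm (List.mem_map.mpr ⟨q, hq, hque.symm⟩)
      rw [if_neg hnex, if_pos hm]
      simp [hi]
  · have hnone : u[i]? = none := List.getElem?_eq_none (by omega)
    rw [hnone]
    have hnex : ¬ ∃ q ∈ vs, (none : Option String) = some q.2 := by
      rintro ⟨q, hq, hque⟩
      cases hque
    rw [if_neg hnex]
    simp
    omega

-- ===== VERDICT (by name: the statement is the Claim_ definition above) =====
theorem generate_absence_presence_HPO_spec : Claim_equal_generate_absence_presence_HPO := by
  intro g _
  unfold Spec_generate_absence_presence_HPO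
  obtain ⟨h1, h2, h3⟩ := gap_pass1_eq g
  unfold generate_absence_presence_HPO generate_absence_presence_HPO_alt
  simp only [h1, h2]
  refine congrArg _ ?_
  rw [foldl_append_eq_map, foldl_append_eq_map]
  simp only [List.map_map, List.nil_append]
  refine List.map_congr_left (fun pat _ => ?_) 
  simp only [Function.comp]
  rw [gapB_row_eq _ _ h3, foldl_append_eq_map]
  simp
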